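-- pv_equiv track=rewrite | github.com/hoduc/Soboma | ui.py | wrap_text_href
-- ===== SOURCE A (Python) =====
-- def wrap_text_href(text):
--     s = ""
--     word = ""
--     i = 0
--     while i < len(text):
--         while i < len(text) and (text[i] == " " or text[i] == "\n"):
--             s += text[i]
--             i += 1
--         while i < len(text) and text[i] != " " and text[i] != "\n":
--             word += text[i]
--             i += 1
--         # either found word
--         s += href_word(word)
--         word = ""
--     s += href_word(word)
--     return s
--
-- def href_word(word, content = ""):
--     if content == "":
--         content = word
--     return "<a href=\"{}\">{}</a>".format(word, content) if word and word.startswith("http") else word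
-- ===== SOURCE B (Python) =====
-- def href_word(word, content = ""):
--     if content == "":
--         content = word
--     return "<a href=\"{}\">{}</a>".format(word, content) if word and word.startswith("http") else word
--
-- def wrap_text_href(text):
--     return "\n".join(
--         " ".join(href_word(word) for word in line.split(" "))
--         for line in text.split("\n"))
-- ===== Notes on version B (the rewrite author's own statement) =====
-- stated objective: idiomatic
-- what changed: Replaced the index-driven char-by-char scanner with incremental string concatenation by a split-then-map-then-join pipeline: split on newlines, split each line on spaces (single-char separators keep empty tokens, so whitespace runs are preserved), wrap each token with href_word, and rejoin.
import Mathlib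
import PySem

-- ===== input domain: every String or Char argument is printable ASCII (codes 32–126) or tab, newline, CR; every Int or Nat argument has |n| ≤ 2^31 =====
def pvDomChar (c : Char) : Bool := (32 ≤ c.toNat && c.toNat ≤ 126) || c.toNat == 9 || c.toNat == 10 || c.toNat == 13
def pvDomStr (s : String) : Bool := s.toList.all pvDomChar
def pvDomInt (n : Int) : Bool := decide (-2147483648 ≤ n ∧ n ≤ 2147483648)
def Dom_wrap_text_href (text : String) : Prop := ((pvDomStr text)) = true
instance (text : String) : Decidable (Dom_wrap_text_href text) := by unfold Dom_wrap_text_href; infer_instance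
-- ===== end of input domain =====

-- B replaces A's index-driven character scanner with incremental `s +=` accumulation by an
-- idiomatic split-then-map-then-join pipeline (split on "\n", split each line on " ",
-- wrap each token with href_word, rejoin); same return value, no side effects.

-- ===== PORT A =====
-- shared helper: Python's href_word (both A and B call it); strings ported as List Char
def hrefWord (word : List Char) : List Char :=
  if !word.isEmpty && PySem.Chars.startswith word ['h', 't', 't', 'p'] then
    "<a href=\"".toList ++ word ++ "\">".toList ++ word ++ "</a>".toList
  else word

-- text[i] == " " or text[i] == "\n"
def sepChar (c : Char) : Bool := c == ' ' || c == '\n'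

-- termination helper for the outer while loop (each iteration consumes ≥ 1 char)
theorem wrapGo_dec (cs : List Char) (h : ¬ cs = []) :
    ((cs.dropWhile sepChar).dropWhile (fun c => !sepChar c)).length < cs.length := by
  cases cs with
  | nil => exact absurd rfl h
  | cons a t =>
    by_cases hs : sepChar a = true
    · calc ((List.dropWhile sepChar (a :: t)).dropWhile (fun c => !sepChar c)).length
          ≤ (List.dropWhile sepChar (a :: t)).length := List.length_dropWhile_le _ _
        _ ≤ t.length := by simp [List.dropWhile_cons, hs, List.length_dropWhile_le]
        _ < (a :: t).length := by simp
    · have h1 : List.dropWhile sepChar (a :: t) = a :: t := by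
        simp [List.dropWhile_cons, hs]
      have h2 : List.dropWhile (fun c => !sepChar c) (a :: t)
          = List.dropWhile (fun c => !sepChar c) t := by
        simp [List.dropWhile_cons, hs]
      rw [h1, h2]
      calc (List.dropWhile (fun c => !sepChar c) t).length
          ≤ t.length := List.length_dropWhile_le _ _
        _ < (a :: t).length := by simp

-- the outer `while i < len(text)` loop of A: copy a run of separators verbatim,
-- take the following maximal word, append href_word(word), continue on the rest
def wrapGo (cs : List Char) : List Char :=
  if h : cs = [] then []
  else
    let sp := cs.takeWhile sepChar
    let rest := cs.dropWhile sepChar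
    let w := rest.takeWhile (fun c => !sepChar c)
    let r2 := rest.dropWhile (fun c => !sepChar c)
    sp ++ hrefWord w ++ wrapGo r2
termination_by cs.length
decreasing_by exact wrapGo_dec cs h

def wrap_text_href (text : String) : String :=
  -- after the loop, A appends href_word("") (the leftover empty `word`)
  String.mk (wrapGo text.toList ++ hrefWord [])

-- ===== PORT B =====
-- "\n".join(" ".join(href_word(word) for word in line.split(" ")) for line in text.split("\n"))
def wrap_text_href_alt (text : String) : String :=
  String.mk (PySem.Chars.join ['\n']
    ((PySem.Chars.splitOn text.toList ['\n']).map (fun line =>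
      PySem.Chars.join [' '] ((PySem.Chars.splitOn line [' ']).map hrefWord))))

-- ===== PRECONDITION & SPEC =====
def Spec_wrap_text_href (text : String) (out : String) : Prop := out = wrap_text_href_alt text
instance (text : String) (out : String) : Decidable (Spec_wrap_text_href text out) := by unfold Spec_wrap_text_href; infer_instance

-- ===== CLAIM (what is proved, stated in full; the proofs are below) =====
def Claim_equal_wrap_text_href : Prop := ∀ (text : String), Dom_wrap_text_href text → Spec_wrap_text_href text (wrap_text_href text)

-- ===== LEMMAS AND PROOFS =====

-- B's inner per-line pipeline and B's whole pipeline, phrased via List.splitOnP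
def gLine (l : List Char) : List Char :=
  PySem.Chars.join [' '] ((l.splitOnP (· == ' ')).map hrefWord)

def bFun (cs : List Char) : List Char :=
  PySem.Chars.join ['\n'] ((cs.splitOnP (· == '\n')).map gLine)

theorem modifyHead_fun_id {α : Type} (l : List α) :
    List.modifyHead (fun x => x) l = l := by
  cases l <;> rfl

-- PySem's str.split on a single-character separator is List.splitOnP
theorem splitOn_go_single (c : Char) : ∀ (l : List Char) (fuel : Nat), l.length ≤ fuel →
    ∀ (cur : List Char) (acc : List (List Char)),
    PySem.Chars.splitOn.go [c] fuel l cur acc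
      = acc.reverse ++ (l.splitOnP (· == c)).modifyHead (cur.reverse ++ ·) := by
  intro l
  induction l with
  | nil =>
    intro fuel _ cur acc
    cases fuel <;> simp [PySem.Chars.splitOn.go, List.splitOnP_nil]
  | cons a t ih =>
    intro fuel hf cur acc
    cases fuel with
    | zero => simp at hf
    | succ f =>
      rw [PySem.Chars.splitOn.go]
      have ht : t.length ≤ f := by simpa using hf
      by_cases hc : a = c
      · subst hc
        have hpre : (([a] : List Char).isPrefixOf (a :: t)) = true := by
          simp [List.isPrefixOf]
        rw [if_pos hpre]
        have hdrop : List.drop ([a] : List Char).length (a :: t) = t := by simp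
        rw [hdrop, ih f ht [] (cur.reverse :: acc)]
        simp [List.splitOnP_cons, modifyHead_fun_id]
      · have hpre : (([c] : List Char).isPrefixOf (a :: t)) = false := by
          simp only [List.isPrefixOf, Bool.and_eq_false_iff, beq_eq_false_iff_ne]
          exact Or.inl (fun h => hc h.symm)
        rw [hpre]
        simp only [Bool.false_eq_true, if_false]
        rw [ih f ht (a :: cur) acc]
        have hba : (a == c) = false := beq_eq_false_iff_ne.mpr hc
        simp only [List.splitOnP_cons, hba, Bool.false_eq_true, if_false,
          List.modifyHead_modifyHead]
        congr 1
        congr 1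
        funext x
        simp

theorem splitOn_single (l : List Char) (c : Char) :
    PySem.Chars.splitOn l [c] = l.splitOnP (· == c) := by
  unfold PySem.Chars.splitOn
  rw [splitOn_go_single c l (l.length + 1) (by omega) [] []]
  simp [modifyHead_fun_id]

theorem hrefWord_nil : hrefWord [] = [] := rfl

-- join with a ++-decomposed head
theorem join_prefix (sep x y : List Char) (rest : List (List Char)) :
    PySem.Chars.join sep ((x ++ y) :: rest) = x ++ PySem.Chars.join sep (y :: rest) := by
  cases rest with
  | nil => simp [PySem.Chars.join_singleton]
  | cons b bs => simp [PySem.Chars.join_cons_cons]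

-- splitOnP over a separator-free prefix
theorem splitOnP_sepfree_append {p : Char → Bool} : ∀ (w r : List Char),
    (∀ a ∈ w, p a = false) →
    (w ++ r).splitOnP p = (r.splitOnP p).modifyHead (w ++ ·) := by
  intro w
  induction w with
  | nil => intro r _; simp [modifyHead_fun_id]
  | cons a w ih =>
    intro r h
    have ha : p a = false := h a (by simp)
    simp only [List.cons_append, List.splitOnP_cons, ha, Bool.false_eq_true, if_false]
    rw [ih r (fun x hx => h x (by simp [hx])), List.modifyHead_modifyHead]
    congr 1

theorem gLine_nil : gLine [] = [] := by
  simp [gLine, List.splitOnP_nil, hrefWord_nil, PySem.Chars.join_singleton]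

theorem gLine_cons_sp (l : List Char) : gLine (' ' :: l) = ' ' :: gLine l := by
  obtain ⟨m, M, hM⟩ := List.exists_cons_of_ne_nil (List.splitOnP_ne_nil (· == ' ') l)
  unfold gLine
  rw [List.splitOnP_cons]
  simp only [BEq.rfl, if_true, hM, List.map_cons, hrefWord_nil,
    PySem.Chars.join_cons_cons, List.nil_append]
  rfl

theorem gLine_single (w : List Char) (hw : ∀ a ∈ w, (a == ' ') = false) :
    gLine w = hrefWord w := by
  have h1 : w.splitOnP (· == ' ') = [w] := by
    have h2 := splitOnP_sepfree_append w [] hw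
    simpa [List.splitOnP_nil] using h2
  unfold gLine
  rw [h1]
  simp [PySem.Chars.join_singleton]

theorem gLine_word (w l : List Char) (hw : ∀ a ∈ w, (a == ' ') = false) :
    gLine (w ++ ' ' :: l) = hrefWord w ++ ' ' :: gLine l := by
  obtain ⟨m, M, hM⟩ := List.exists_cons_of_ne_nil (List.splitOnP_ne_nil (· == ' ') l)
  unfold gLine
  rw [splitOnP_sepfree_append w (' ' :: l) hw, List.splitOnP_cons]
  simp only [BEq.rfl, if_true, List.modifyHead_cons, List.append_nil, hM,
    List.map_cons, PySem.Chars.join_cons_cons]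
  simp [List.append_assoc]

theorem bFun_nil : bFun [] = [] := by
  simp [bFun, List.splitOnP_nil, gLine_nil, PySem.Chars.join_singleton]

theorem bFun_cons_sep (c : Char) (t : List Char) (hc : sepChar c = true) :
    bFun (c :: t) = c :: bFun t := by
  have hc' : c = ' ' ∨ c = '\n' := by
    have := hc
    simp only [sepChar, Bool.or_eq_true, beq_iff_eq] at this
    exact this
  obtain ⟨m, M, hM⟩ := List.exists_cons_of_ne_nil (List.splitOnP_ne_nil (· == '\n') t)
  rcases hc' with h | h <;> subst h
  · -- c = ' '
    unfold bFun
    rw [List.splitOnP_cons]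
    simp only [show ((' ' : Char) == '\n') = false from by decide, Bool.false_eq_true,
      if_false, hM, List.modifyHead_cons, List.map_cons, gLine_cons_sp]
    have : (' ' :: gLine m) = [' '] ++ gLine m := rfl
    rw [this, join_prefix]
    rfl
  · -- c = '\n'
    unfold bFun
    rw [List.splitOnP_cons]
    simp only [BEq.rfl, if_true, hM, List.map_cons, gLine_nil,
      PySem.Chars.join_cons_cons, List.nil_append]
    rfl

theorem bFun_word (w r : List Char) (hw : ∀ a ∈ w, sepChar a = false)
    (hr : r = [] ∨ ∃ c t, r = c :: t ∧ sepChar c = true) :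
    bFun (w ++ r) = hrefWord w ++ bFun r := by
  have hwn : ∀ a ∈ w, (a == '\n') = false := by
    intro a ha
    have := hw a ha
    simp only [sepChar, Bool.or_eq_false_iff] at this
    exact this.2
  have hws : ∀ a ∈ w, (a == ' ') = false := by
    intro a ha
    have := hw a ha
    simp only [sepChar, Bool.or_eq_false_iff] at this
    exact this.1
  rcases hr with rfl | ⟨c, t, rfl, hc⟩
  · -- r = []
    rw [List.append_nil, bFun_nil, List.append_nil]
    have h1 : w.splitOnP (· == '\n') = [w] := by
      have h2 := splitOnP_sepfree_append w [] hwn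
      simpa [List.splitOnP_nil] using h2
    unfold bFun
    rw [h1]
    simp only [List.map_cons, List.map_nil, PySem.Chars.join_singleton]
    exact gLine_single w hws
  · have hc' : c = ' ' ∨ c = '\n' := by
      have := hc
      simp only [sepChar, Bool.or_eq_true, beq_iff_eq] at this
      exact this
    obtain ⟨m, M, hM⟩ := List.exists_cons_of_ne_nil (List.splitOnP_ne_nil (· == '\n') t)
    rcases hc' with h | h <;> subst h
    · -- r = ' ' :: t
      unfold bFun
      rw [splitOnP_sepfree_append w (' ' :: t) hwn, List.splitOnP_cons]
      simp only [show ((' ' : Char) == '\n') = false from by decide, Bool.false_eq_true,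
        if_false, hM, List.modifyHead_cons, List.map_cons]
      rw [gLine_word w m hws, gLine_cons_sp,
        show (' ' :: gLine m) = [' '] ++ gLine m from rfl, join_prefix]
    · -- r = '\n' :: t
      unfold bFun
      rw [splitOnP_sepfree_append w ('\n' :: t) hwn, List.splitOnP_cons]
      simp only [BEq.rfl, if_true, List.modifyHead_cons, List.append_nil, hM,
        List.map_cons, PySem.Chars.join_cons_cons, gLine_nil, List.nil_append]
      simp [List.append_assoc]
      exact gLine_single w hws

theorem bFun_seprun : ∀ (sp u : List Char), (∀ a ∈ sp, sepChar a = true) →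
    bFun (sp ++ u) = sp ++ bFun u := by
  intro sp
  induction sp with
  | nil => intro u _; simp
  | cons a t ih =>
    intro u h
    have := bFun_cons_sep a (t ++ u) (h a (by simp))
    simp only [List.cons_append, this, ih u (fun x hx => h x (by simp [hx]))]

theorem dropWhile_head_not {α : Type} {p : α → Bool} {l : List α} {b : α} {bt : List α}
    (h : l.dropWhile p = b :: bt) : p b = false := by
  induction l with
  | nil => simp at h
  | cons a t ih =>
    rw [List.dropWhile_cons] at h
    by_cases hp : p a = true
    · rw [if_pos hp] at h
      exact ih h
    · rw [if_neg hp] at h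
      cases h
      simpa using hp

theorem wrapGo_eq_bFun : ∀ (n : Nat) (cs : List Char), cs.length ≤ n →
    wrapGo cs = bFun cs := by
  intro n
  induction n with
  | zero =>
    intro cs h
    have hnil : cs = [] := List.eq_nil_of_length_eq_zero (Nat.le_zero.mp h)
    subst hnil
    rw [wrapGo, bFun_nil]
    simp
  | succ n ih =>
    intro cs h
    by_cases hcs : cs = []
    · subst hcs
      rw [wrapGo, bFun_nil]
      simp
    · rw [wrapGo, dif_neg hcs]
      show cs.takeWhile sepChar ++
          hrefWord ((cs.dropWhile sepChar).takeWhile (fun c => !sepChar c)) ++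
          wrapGo ((cs.dropWhile sepChar).dropWhile (fun c => !sepChar c)) = bFun cs
      have hdec := wrapGo_dec cs hcs
      have ihr := ih ((cs.dropWhile sepChar).dropWhile (fun c => !sepChar c)) (by omega)
      rw [ihr]
      have hsp : ∀ a ∈ cs.takeWhile sepChar, sepChar a = true :=
        fun a ha => List.mem_takeWhile_imp ha
      have hw : ∀ a ∈ (cs.dropWhile sepChar).takeWhile (fun c => !sepChar c),
          sepChar a = false := by
        intro a ha
        have := List.mem_takeWhile_imp ha
        simpa using this
      have hr2 : ((cs.dropWhile sepChar).dropWhile (fun c => !sepChar c)) = [] ∨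
          ∃ c t, ((cs.dropWhile sepChar).dropWhile (fun c => !sepChar c)) = c :: t ∧
            sepChar c = true := by
        cases hd : (cs.dropWhile sepChar).dropWhile (fun c => !sepChar c) with
        | nil => exact Or.inl rfl
        | cons b bt =>
          refine Or.inr ⟨b, bt, rfl, ?_⟩
          have := dropWhile_head_not hd
          simpa using this
      conv_rhs => rw [← List.takeWhile_append_dropWhile (p := sepChar) (l := cs)]
      rw [bFun_seprun _ _ hsp]
      conv_rhs => rw [← List.takeWhile_append_dropWhile (p := fun c => !sepChar c)
        (l := cs.dropWhile sepChar)]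
      rw [bFun_word _ _ hw hr2]
      simp [List.append_assoc]

theorem alt_eq_bFun (text : String) :
    wrap_text_href_alt text = String.mk (bFun text.toList) := by
  simp only [wrap_text_href_alt, splitOn_single]
  rfl

-- ===== VERDICT (by name: the statement is the Claim_ definition above) =====
theorem wrap_text_href_spec : Claim_equal_wrap_text_href := by
  intro text _
  unfold Spec_wrap_text_href
  rw [alt_eq_bFun, wrap_text_href, hrefWord_nil, List.append_nil,
    wrapGo_eq_bFun text.toList.length text.toList le_rfl]
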